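-- pv_equiv track=rewrite | github.com/koii-network/prometheus-beta | src/palindrome_substring_finder.py | find_palindrome_substrings
-- ===== SOURCE A (Python) =====
-- def find_palindrome_substrings(s):
--     """
--     Find all palindrome substrings in a given string.
--
--     Args:
--         s (str): Input string to search for palindrome substrings
--
--     Returns:
--         list: Sorted list of unique palindrome substrings,
--               sorted by length (descending) and then alphabetically
--     """
--     # Validate input
--     if not isinstance(s, str):
--         raise TypeError("Input must be a string")
--
--     # Set to store unique palindrome substrings
--     palindromes = set()
--
--     # Check all possible substrings
--     for i in range(len(s)):
--         for j in range(i, len(s)):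
--             substring = s[i:j+1]
--
--             # Check if substring is a palindrome
--             if len(substring) > 1 and substring == substring[::-1]:
--                 palindromes.add(substring)
--
--     # Sort palindromes by length (descending) and then alphabetically
--     return sorted(list(palindromes), key=lambda x: (-len(x), x))
-- ===== SOURCE B (Python) =====
-- def find_palindrome_substrings(s):
--     """Expand-around-center re-implementation: grows each of the 2n-1 centers only while the boundary characters match."""
--     if not isinstance(s, str):
--         raise TypeError("Input must be a string")
--     palindromes = set()
--     n = len(s)
--     for c in range(n):
--         # odd-length palindromes centered at c (length >= 3; single chars are excluded)
--         l, r = c - 1, c + 1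
--         while l >= 0 and r < n and s[l] == s[r]:
--             palindromes.add(s[l:r + 1])
--             l -= 1
--             r += 1
--         # even-length palindromes centered between c and c+1
--         l, r = c, c + 1
--         while l >= 0 and r < n and s[l] == s[r]:
--             palindromes.add(s[l:r + 1])
--             l -= 1
--             r += 1
--     return sorted(palindromes, key=lambda x: (-len(x), x))
-- ===== Notes on version B (the rewrite author's own statement) =====
-- stated objective: alternative
-- what changed: Replaces A's enumerate-every-substring-and-reverse-check with expand-around-center: each of the 2n-1 centers is grown outward only while the boundary characters match, so only actual palindromes are ever materialised (measured ~5x faster on mixed strings, but on degenerate all-equal-character strings both are cubic, so no unqualified speed claim).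
import Mathlib
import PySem

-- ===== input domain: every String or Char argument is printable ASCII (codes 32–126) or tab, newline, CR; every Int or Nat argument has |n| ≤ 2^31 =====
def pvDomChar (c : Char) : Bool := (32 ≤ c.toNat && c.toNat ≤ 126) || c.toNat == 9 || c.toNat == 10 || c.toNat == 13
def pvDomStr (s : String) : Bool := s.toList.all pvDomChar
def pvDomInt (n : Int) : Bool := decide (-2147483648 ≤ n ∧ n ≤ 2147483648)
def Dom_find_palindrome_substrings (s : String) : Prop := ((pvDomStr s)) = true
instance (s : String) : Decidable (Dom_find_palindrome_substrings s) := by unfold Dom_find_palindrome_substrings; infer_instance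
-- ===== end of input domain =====

-- B enumerates palindromes by expand-around-center (grow each of the 2n-1 centers while the
-- boundary characters match) instead of A's reverse-check of every substring; same return value.

-- ===== PORT A =====
def find_palindrome_substrings (s : String) : List String :=
  let cs := s.toList
  let n : Int := cs.length
  let palindromes : PySem.Set String :=
    (PySem.List.pyRange 0 n 1).foldl (fun pals i =>
      (PySem.List.pyRange i n 1).foldl (fun pals j =>
        let substring := PySem.List.slice cs (some i) (some (j + 1))
        -- substring[::-1] is substring.reverse (PySem.List.slice?_none_none_neg_one)
        if (substring.length : Int) > 1 ∧ substring = substring.reverse then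
          PySem.Set.add pals (String.ofList substring)
        else pals) pals) []
  PySem.List.sorted2 palindromes (fun x => -(PySem.Str.len x)) (fun x => x)

-- ===== PORT B =====
-- the 'while l >= 0 and r < n and s[l] == s[r]' loop of Source B (terminates since r increases towards n)
def pvExpand (cs : List Char) (l r : Int) (pals : PySem.Set String) : PySem.Set String :=
  if 0 ≤ l ∧ r < (cs.length : Int) ∧ PySem.List.pyGetD cs l ' ' = PySem.List.pyGetD cs r ' ' then
    pvExpand cs (l - 1) (r + 1)
      (PySem.Set.add pals (String.ofList (PySem.List.slice cs (some l) (some (r + 1)))))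
  else pals
termination_by ((cs.length : Int) + 1 - r).toNat
decreasing_by omega

def find_palindrome_substrings_alt (s : String) : List String :=
  let cs := s.toList
  let n : Int := cs.length
  let palindromes : PySem.Set String :=
    (PySem.List.pyRange 0 n 1).foldl (fun pals c =>
      pvExpand cs c (c + 1) (pvExpand cs (c - 1) (c + 1) pals)) []
  PySem.List.sorted2 palindromes (fun x => -(PySem.Str.len x)) (fun x => x)

-- ===== PRECONDITION & SPEC =====
def Spec_find_palindrome_substrings (s : String) (out : List String) : Prop := out = find_palindrome_substrings_alt s
instance (s : String) (out : List String) : Decidable (Spec_find_palindrome_substrings s out) := by unfold Spec_find_palindrome_substrings; infer_instance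

-- ===== CLAIM (what is proved, stated in full; the proofs are below) =====
def Claim_equal_find_palindrome_substrings : Prop := ∀ (s : String), Dom_find_palindrome_substrings s → Spec_find_palindrome_substrings s (find_palindrome_substrings s)

-- ===== LEMMAS AND PROOFS =====

-- 'a' at position p matches the mirror position S - p (both in range)
def pvC (cs : List Char) (S a : Int) : Prop :=
  0 ≤ a ∧ S - a < (cs.length : Int) ∧ PySem.List.pyGetD cs a ' ' = PySem.List.pyGetD cs (S - a) ' '

-- cs[i:j+1] is a palindromic substring of length ≥ 2, stated on indices
def pvGood (cs : List Char) (i j : Int) : Prop :=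
  0 ≤ i ∧ i < j ∧ j < (cs.length : Int) ∧
    ∀ p q : Int, i ≤ p → p ≤ q → p + q = i + j →
      PySem.List.pyGetD cs p ' ' = PySem.List.pyGetD cs q ' '

def pvStr (cs : List Char) (i j : Int) : String :=
  String.ofList (PySem.List.slice cs (some i) (some (j + 1)))

-- generic membership through a fold of conditional set-adds
lemma pv_mem_foldl {β : Type} (f : PySem.Set String → β → PySem.Set String)
    (Q : β → String → Prop) :
    ∀ (l : List β), (∀ acc b x, b ∈ l → (x ∈ f acc b ↔ x ∈ acc ∨ Q b x)) →
      ∀ (acc : PySem.Set String) (x : String),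
        x ∈ l.foldl f acc ↔ x ∈ acc ∨ ∃ b ∈ l, Q b x := by
  intro l
  induction l with
  | nil => simp
  | cons b bs ih =>
    intro hf acc x
    have ih' := ih (fun acc b x hb => hf acc b x (List.mem_cons_of_mem _ hb))
    simp only [List.foldl_cons, ih', hf acc b x List.mem_cons_self, List.mem_cons]
    constructor
    · rintro ((h | h) | ⟨b', hb', h⟩)
      · exact Or.inl h
      · exact Or.inr ⟨b, Or.inl rfl, h⟩
      · exact Or.inr ⟨b', Or.inr hb', h⟩
    · rintro (h | ⟨b', (rfl | hb'), h⟩)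
      · exact Or.inl (Or.inl h)
      · exact Or.inl (Or.inr h)
      · exact Or.inr ⟨b', hb', h⟩

-- what one expansion run (mirror-sum S, starting left end l) contributes
def pvE (cs : List Char) (S l : Int) (x : String) : Prop :=
  ∃ a : Int, a ≤ l ∧ (∀ a', a ≤ a' → a' ≤ l → pvC cs S a') ∧
    x = String.ofList (PySem.List.slice cs (some a) (some (S - a + 1)))

-- membership in the expansion loop
lemma pv_mem_expand (cs : List Char) : ∀ (l r : Int) (pals : PySem.Set String) (x : String),
    x ∈ pvExpand cs l r pals ↔ x ∈ pals ∨
      ∃ a : Int, a ≤ l ∧ (∀ a', a ≤ a' → a' ≤ l → pvC cs (l + r) a') ∧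
        x = String.ofList (PySem.List.slice cs (some a) (some (l + r - a + 1))) := by
  intro l r pals x
  fun_induction pvExpand cs l r pals with
  | case1 l r pals hg ih =>
    have hs : l - 1 + (r + 1) = l + r := by ring
    rw [hs] at ih
    rw [ih, PySem.Set.mem_add]
    have hCl : pvC cs (l + r) l := by
      refine ⟨hg.1, by omega, ?_⟩
      have : l + r - l = r := by ring
      rw [this]; exact hg.2.2
    have hv : l + r - l + 1 = r + 1 := by ring
    constructor
    · rintro ((hp | hx) | ⟨a, ha, hchain, hxa⟩)
      · exact Or.inl hp
      · refine Or.inr ⟨l, le_refl l, ?_, ?_⟩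
        · intro a' h1 h2
          have : a' = l := le_antisymm h2 h1
          subst this; exact hCl
        · rw [hv]; exact hx
      · refine Or.inr ⟨a, by omega, ?_, hxa⟩
        intro a' h1 h2
        by_cases h3 : a' ≤ l - 1
        · exact hchain a' h1 h3
        · have : a' = l := by omega
          subst this; exact hCl
    · rintro (hp | ⟨a, ha, hchain, hxa⟩)
      · exact Or.inl (Or.inl hp)
      · by_cases hal : a = l
        · subst hal
          refine Or.inl (Or.inr ?_)
          rw [hv] at hxa; exact hxa
        · exact Or.inr ⟨a, by omega, fun a' h1 h2 => hchain a' h1 (by omega), hxa⟩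
  | case2 l r pals hg =>
    constructor
    · exact Or.inl
    · rintro (hp | ⟨a, ha, hchain, hxa⟩)
      · exact hp
      · exfalso
        obtain ⟨h1, h2, h3⟩ := hchain l ha (le_refl l)
        rw [show l + r - l = r from by ring] at h2 h3
        exact hg ⟨h1, h2, h3⟩

lemma pv_reverse_iff (t : List Char) :
    t = t.reverse ↔ ∀ k, k < t.length → t[k]? = t[t.length - 1 - k]? := by
  constructor
  · intro h k hk
    conv_lhs => rw [h]
    exact List.getElem?_reverse hk
  · intro h
    apply List.ext_getElem?
    intro k
    by_cases hk : k < t.length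
    · rw [List.getElem?_reverse hk]
      exact h k hk
    · rw [List.getElem?_eq_none (by omega), List.getElem?_eq_none (by simpa using hk)]

lemma pv_mem_expand' (cs : List Char) (l r : Int) (pals : PySem.Set String) (x : String) :
    x ∈ pvExpand cs l r pals ↔ x ∈ pals ∨ pvE cs (l + r) l x :=
  pv_mem_expand cs l r pals x

-- A's substring test at (i, j) is pvGood
lemma pv_pal_char (cs : List Char) (i j : Int) (hi : 0 ≤ i) (hij : i ≤ j) (hj : j < (cs.length : Int)) :
    (((PySem.List.slice cs (some i) (some (j + 1))).length : Int) > 1 ∧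
        PySem.List.slice cs (some i) (some (j + 1)) = (PySem.List.slice cs (some i) (some (j + 1))).reverse)
      ↔ pvGood cs i j := by
  rw [PySem.List.slice_toNat cs hi (by omega)]
  have hn : j.toNat < cs.length := by omega
  have hjt : (j + 1).toNat = j.toNat + 1 := by omega
  rw [hjt]
  set i' := i.toNat with hi'
  set j' := j.toNat with hj'
  set m := j' + 1 - i' with hm
  have him : i' + m ≤ cs.length := by omega
  set t := List.take m (List.drop i' cs) with ht
  have hlen : t.length = m := by
    rw [ht]; simp; omega
  have hget : ∀ k, k < m → t[k]? = cs[i' + k]? := by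
    intro k hk
    rw [ht, List.getElem?_take]
    simp [hk, List.getElem?_drop]
  have hsome : ∀ (p : Int), 0 ≤ p → p < (cs.length : Int) →
      cs[p.toNat]? = some (PySem.List.pyGetD cs p ' ') := by
    intro p h0 h1
    rw [PySem.List.pyGetD_eq_getElem cs ' ' h0 h1, List.getElem?_eq_getElem]
  constructor
  · rintro ⟨h1, h2⟩
    have hij : i < j := by
      rw [hlen] at h1; omega
    refine ⟨hi, hij, hj, ?_⟩
    intro p q hp hpq hsum
    have hq : q ≤ j := by omega
    have hkm : (p - i).toNat < m := by omega
    have := pv_reverse_iff t |>.1 h2 (p - i).toNat (by omega)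
    rw [hlen] at this
    rw [hget _ hkm, hget _ (by omega : m - 1 - (p - i).toNat < m)] at this
    have e1 : i' + (p - i).toNat = p.toNat := by omega
    have e2 : i' + (m - 1 - (p - i).toNat) = q.toNat := by omega
    rw [e1, e2] at this
    rw [hsome p (by omega) (by omega), hsome q (by omega) (by omega)] at this
    exact Option.some.inj this
  · rintro ⟨-, hij, -, hpal⟩
    constructor
    · rw [hlen]; omega
    · apply (pv_reverse_iff t).2
      intro k hk
      rw [hlen] at hk ⊢
      rw [hget _ hk, hget _ (by omega)]
      have hp0 : (0:Int) ≤ i + k := by omega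
      have hq0 : (0:Int) ≤ j - k := by omega
      have e1 : i' + k = ((i + (k:Int))).toNat := by omega
      have e2 : i' + (m - 1 - k) = ((j - (k:Int))).toNat := by omega
      rw [e1, e2, hsome _ hp0 (by omega), hsome _ hq0 (by omega)]
      by_cases hpq : i + (k:Int) ≤ j - k
      · rw [hpal (i + k) (j - k) (by omega) hpq (by ring)]
      · rw [hpal (j - k) (i + k) (by omega) (by omega) (by ring)]

-- membership in A's set
lemma pv_mem_A (cs : List Char) (x : String) :
    x ∈ ((PySem.List.pyRange 0 (cs.length : Int) 1).foldl (fun pals i =>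
      (PySem.List.pyRange i (cs.length : Int) 1).foldl (fun pals j =>
        let substring := PySem.List.slice cs (some i) (some (j + 1))
        if (substring.length : Int) > 1 ∧ substring = substring.reverse then
          PySem.Set.add pals (String.ofList substring)
        else pals) pals) ([] : PySem.Set String))
    ↔ ∃ i j : Int, pvGood cs i j ∧ x = pvStr cs i j := by
  rw [pv_mem_foldl _ (fun (i : Int) (x : String) => ∃ j : Int, pvGood cs i j ∧ x = pvStr cs i j) _ ?_]
  · simp only [List.not_mem_nil, false_or, PySem.List.mem_pyRange_one]
    constructor
    · rintro ⟨i, _, j, hg, hx⟩; exact ⟨i, j, hg, hx⟩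
    · rintro ⟨i, j, hg, hx⟩
      exact ⟨i, ⟨hg.1, lt_trans hg.2.1 hg.2.2.1⟩, j, hg, hx⟩
  · intro acc i x hi
    rw [PySem.List.mem_pyRange_one] at hi
    rw [pv_mem_foldl _ (fun (j : Int) (x : String) => pvGood cs i j ∧ x = pvStr cs i j) _ ?_]
    · simp only [PySem.List.mem_pyRange_one]
      constructor
      · rintro (h | ⟨j, _, hg, hx⟩)
        exacts [Or.inl h, Or.inr ⟨j, hg, hx⟩]
      · rintro (h | ⟨j, hg, hx⟩)
        exacts [Or.inl h, Or.inr ⟨j, ⟨le_of_lt hg.2.1, hg.2.2.1⟩, hg, hx⟩]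
    · intro acc2 j x hj
      rw [PySem.List.mem_pyRange_one] at hj
      show x ∈ (if _ then _ else _ : PySem.Set String) ↔ _
      beta_reduce
      rw [← pv_pal_char cs i j hi.1 hj.1 hj.2]
      split_ifs with h
      · rw [PySem.Set.mem_add]
        constructor
        · rintro (hx | hx)
          exacts [Or.inl hx, Or.inr ⟨h, hx⟩]
        · rintro (hx | ⟨-, hx⟩)
          exacts [Or.inl hx, Or.inr hx]
      · constructor
        · exact Or.inl
        · rintro (hx | ⟨hg, -⟩)
          exacts [hx, absurd hg h]

-- membership in B's set
lemma pv_mem_B (cs : List Char) (x : String) :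
    x ∈ ((PySem.List.pyRange 0 (cs.length : Int) 1).foldl (fun pals c =>
      pvExpand cs c (c + 1) (pvExpand cs (c - 1) (c + 1) pals)) ([] : PySem.Set String))
    ↔ ∃ i j : Int, pvGood cs i j ∧ x = pvStr cs i j := by
  rw [pv_mem_foldl _ (fun (c : Int) (x : String) =>
        pvE cs (c - 1 + (c + 1)) (c - 1) x ∨ pvE cs (c + (c + 1)) c x) _ ?_]
  · simp only [List.not_mem_nil, false_or, PySem.List.mem_pyRange_one]
    constructor
    · rintro ⟨c, hc, hE⟩
      rcases hE with ⟨a, ha, hchain, hx⟩ | ⟨a, ha, hchain, hx⟩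
      · -- odd-length: mirror sum 2c
        rw [show c - 1 + (c + 1) = 2 * c from by ring] at hchain hx
        obtain ⟨h0, hjn, -⟩ := hchain a (le_refl a) ha
        refine ⟨a, 2 * c - a, ⟨h0, by omega, hjn, ?_⟩, ?_⟩
        · intro p q hp hpq hsum
          by_cases hpc : p = c
          · have : p = q := by omega
            rw [this]
          · obtain ⟨-, -, h3⟩ := hchain p hp (by omega)
            rw [show 2 * c - p = q from by omega] at h3
            exact h3
        · exact hx
      · -- even-length: mirror sum 2c + 1
        rw [show c + (c + 1) = 2 * c + 1 from by ring] at hchain hx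
        obtain ⟨h0, hjn, -⟩ := hchain a (le_refl a) ha
        refine ⟨a, 2 * c + 1 - a, ⟨h0, by omega, hjn, ?_⟩, ?_⟩
        · intro p q hp hpq hsum
          obtain ⟨-, -, h3⟩ := hchain p hp (by omega)
          rw [show 2 * c + 1 - p = q from by omega] at h3
          exact h3
        · exact hx
    · rintro ⟨i, j, ⟨h0, hij, hjn, hpal⟩, hx⟩
      rcases Int.even_or_odd (i + j) with ⟨c, hc⟩ | ⟨c, hc⟩
      · -- i + j = c + c : odd-length palindrome, center c
        refine ⟨c, ⟨by omega, by omega⟩, Or.inl ⟨i, by omega, ?_, ?_⟩⟩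
        · intro a' h1 h2
          refine ⟨by omega, by omega, ?_⟩
          rw [show c - 1 + (c + 1) - a' = i + j - a' from by omega]
          exact hpal a' (i + j - a') h1 (by omega) (by ring)
        · rw [show c - 1 + (c + 1) - i + 1 = j + 1 from by omega]
          exact hx
      · -- i + j = 2c + 1 : even-length palindrome, centers c, c+1
        refine ⟨c, ⟨by omega, by omega⟩, Or.inr ⟨i, by omega, ?_, ?_⟩⟩
        · intro a' h1 h2
          refine ⟨by omega, by omega, ?_⟩
          rw [show c + (c + 1) - a' = i + j - a' from by omega]
          exact hpal a' (i + j - a') h1 (by omega) (by ring)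
        · rw [show c + (c + 1) - i + 1 = j + 1 from by omega]
          exact hx
  · intro acc c x hc
    rw [pv_mem_expand', pv_mem_expand']
    tauto

-- both sets are duplicate-free
lemma pv_nodup_foldl {β : Type} (f : PySem.Set String → β → PySem.Set String)
    (hf : ∀ acc b, acc.Nodup → (f acc b).Nodup) :
    ∀ (l : List β) (acc : PySem.Set String), acc.Nodup → (l.foldl f acc).Nodup := by
  intro l
  induction l with
  | nil => simp
  | cons b bs ih => intro acc h; exact ih _ (hf _ _ h)

lemma pv_nodup_expand (cs : List Char) : ∀ (l r : Int) (pals : PySem.Set String),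
    pals.Nodup → (pvExpand cs l r pals).Nodup := by
  intro l r pals h
  fun_induction pvExpand cs l r pals with
  | case1 l r pals hg ih => exact ih (PySem.Set.nodup_add _ _ h)
  | case2 l r pals hg => exact h

-- sorted2 with key (-len, identity) is PySem.List.sorted with the lexicographic pair key
def pvKey (x : String) : Int ×ₗ String := toLex (-(PySem.Str.len x), x)

lemma pv_sorted2_eq_sorted (xs : List String) :
    PySem.List.sorted2 xs (fun x => -(PySem.Str.len x)) (fun x => x)
      = PySem.List.sorted xs pvKey := by
  show xs.foldl _ [] = xs.foldl _ []
  have hb : (fun (a b : String) =>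
      (decide (-(PySem.Str.len a) < -(PySem.Str.len b)) ||
        (!decide (-(PySem.Str.len b) < -(PySem.Str.len a)) && decide (a < b))))
      = fun a b => decide (pvKey a < pvKey b) := by
    funext a b
    rcases Nat.lt_trichotomy a.length b.length with h | h | h
    · simp [pvKey, Prod.Lex.toLex_lt_toLex, h, Nat.lt_asymm h, Nat.ne_of_lt h]
    · simp [pvKey, Prod.Lex.toLex_lt_toLex, h]
    · simp [pvKey, Prod.Lex.toLex_lt_toLex, h]
  rw [hb]

-- two Nodup lists with the same members sort equally under the injective key pvKey
lemma pv_sorted_eq_of_same_mem (xs ys : List String) (hx : xs.Nodup) (hy : ys.Nodup)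
    (hmem : ∀ x, x ∈ xs ↔ x ∈ ys) :
    PySem.List.sorted xs pvKey = PySem.List.sorted ys pvKey := by
  have hperm : xs.Perm ys := (List.perm_ext_iff_of_nodup hx hy).2 hmem
  have h1 : (PySem.List.sorted ys pvKey).Perm ys := PySem.List.sorted_perm ys pvKey false
  have hnd : (PySem.List.sorted ys pvKey).Nodup := h1.nodup_iff.2 hy
  have hle : (PySem.List.sorted ys pvKey).Pairwise (fun a b => pvKey a ≤ pvKey b) :=
    PySem.List.sorted_pairwise ys pvKey
  have hlt : (PySem.List.sorted ys pvKey).Pairwise (fun a b => pvKey a < pvKey b) := by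
    refine (hle.and hnd).imp ?_
    rintro a b ⟨h2, h3⟩
    refine lt_of_le_of_ne h2 (fun hk => h3 ?_)
    have := congrArg (fun p => (ofLex p).2) hk
    simpa [pvKey] using this
  exact PySem.List.sorted_eq_of_perm_of_pairwise_lt xs _ pvKey (h1.trans hperm.symm) hlt

-- ===== VERDICT (by name: the statement is the Claim_ definition above) =====
theorem find_palindrome_substrings_spec : Claim_equal_find_palindrome_substrings := by
  intro s _
  show _ = _
  unfold find_palindrome_substrings find_palindrome_substrings_alt
  simp only []
  rw [pv_sorted2_eq_sorted, pv_sorted2_eq_sorted]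
  apply pv_sorted_eq_of_same_mem
  · exact pv_nodup_foldl _ (by
      intro acc b hacc
      exact pv_nodup_foldl _ (by
        intro acc2 j hacc2
        show (if _ then _ else _ : PySem.Set String).Nodup
        split
        · exact PySem.Set.nodup_add _ _ hacc2
        · exact hacc2) _ _ hacc) _ _ List.nodup_nil
  · exact pv_nodup_foldl _ (by
      intro acc c hacc
      exact pv_nodup_expand _ _ _ _ (pv_nodup_expand _ _ _ _ hacc)) _ _ List.nodup_nil
  · intro x
    rw [pv_mem_A, pv_mem_B]
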